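-- pv_equiv track=rewrite | github.com/Lim-JH-Laskaris/BOJAutoPush | 프로그래머스/lv2/72412. 순위 검색/순위 검색.py | binary_compare_count
-- ===== SOURCE A (Python) =====
-- def binary_compare_count(reverse_sorted_list, number):
--     """이진 탐색 방식으로, 역정렬된 리스트에서 특정 숫자보다 큰 숫자의 개수를 찾는 함수"""
--     a,b = 0, len(reverse_sorted_list)
--     while a<b:
--         mid = (a+b) // 2
--         if reverse_sorted_list[mid] >= number:
--             a = mid + 1
--         else:
--             b = mid
--     return a
-- ===== SOURCE B (Python) =====
-- def binary_compare_count(reverse_sorted_list, number):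
--     """Divide-and-conquer on list segments: recurse on slices with an index offset
--     instead of maintaining (a, b) bounds over the whole list."""
--     def go(seg, base):
--         if not seg:
--             return base
--         m = len(seg) // 2
--         if seg[m] >= number:
--             return go(seg[m + 1:], base + m + 1)
--         return go(seg[:m], base)
--     return go(reverse_sorted_list, 0)
-- ===== Notes on version B (the rewrite author's own statement) =====
-- stated objective: alternative
-- what changed: A's iterative while loop over (a, b) index bounds is replaced by divide-and-conquer recursion on list slices seg[m+1:] / seg[:m] carrying an absolute offset; it probes the same elements and returns the same value on every input.
import Mathlib
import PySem

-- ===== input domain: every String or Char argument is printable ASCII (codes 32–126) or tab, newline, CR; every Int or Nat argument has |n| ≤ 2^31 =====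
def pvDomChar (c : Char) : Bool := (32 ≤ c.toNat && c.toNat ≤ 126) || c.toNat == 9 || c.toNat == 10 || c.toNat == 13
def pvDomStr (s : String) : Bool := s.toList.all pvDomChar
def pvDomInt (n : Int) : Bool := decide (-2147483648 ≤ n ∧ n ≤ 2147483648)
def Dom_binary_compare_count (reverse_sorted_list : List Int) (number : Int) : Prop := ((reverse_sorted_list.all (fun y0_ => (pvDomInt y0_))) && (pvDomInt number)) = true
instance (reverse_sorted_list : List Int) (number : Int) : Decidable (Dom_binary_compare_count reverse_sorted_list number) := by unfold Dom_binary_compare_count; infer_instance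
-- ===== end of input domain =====

-- B replaces A's (a,b)-bound while loop by divide-and-conquer recursion on list slices with an
-- index offset; it probes the same elements and returns the identical value on every input.

-- ===== PORT A =====
-- the while loop of A, state (a, b); the midpoint index is always in range when the loop
-- is entered from the top-level call (0 ≤ a ≤ mid < b ≤ len), so pyGetD's default 0 is never used
def bccLoopA (xs : List Int) (number : Int) (a b : Int) : Int :=
  if _h : a < b then
    let mid := PySem.Int.floordiv (a + b) 2
    if PySem.List.pyGetD xs mid 0 ≥ number then
      bccLoopA xs number (mid + 1) b
    else
      bccLoopA xs number a mid
  else a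
termination_by (b - a).toNat
decreasing_by
  all_goals
    have h2 := PySem.Int.floordiv_eq_ediv_of_pos (a := a + b) (b := 2) (by omega)
    simp only [h2] at *
    omega

def binary_compare_count (reverse_sorted_list : List Int) (number : Int) : Int :=
  bccLoopA reverse_sorted_list number 0 (reverse_sorted_list.length : Int)

-- ===== PORT B =====
-- B's go(seg, base): structural divide-and-conquer on the segment itself (Python slices
-- seg[m+1:] and seg[:m] ported as PySem.List.slice), carrying the absolute offset 'base'
def bccGo (number : Int) (seg : List Int) (base : Int) : Int :=
  if seg.isEmpty then base
  else
    let m : Nat := seg.length / 2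
    if PySem.List.pyGetD seg (m : Int) 0 ≥ number then
      bccGo number (PySem.List.slice seg (some ((m : Int) + 1)) none) (base + (m : Int) + 1)
    else
      bccGo number (PySem.List.slice seg none (some (m : Int))) base
termination_by seg.length
decreasing_by
  · have h1 : ((m : Int) + 1) = (((m + 1 : Nat)) : Int) := by push_cast; ring
    rw [h1, PySem.List.slice_from_natCast]
    simp only [List.length_drop]
    have hne : seg ≠ [] := by intro h; subst h; simp_all
    have hlen : 0 < seg.length := List.length_pos_of_ne_nil hne
    omega
  · rw [PySem.List.slice_to_natCast]
    simp only [List.length_take]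
    have hne : seg ≠ [] := by intro h; subst h; simp_all
    have hlen : 0 < seg.length := List.length_pos_of_ne_nil hne
    omega

def binary_compare_count_alt (reverse_sorted_list : List Int) (number : Int) : Int :=
  bccGo number reverse_sorted_list 0

-- ===== PRECONDITION & SPEC =====
def Spec_binary_compare_count (reverse_sorted_list : List Int) (number : Int) (out : Int) : Prop := out = binary_compare_count_alt reverse_sorted_list number
instance (reverse_sorted_list : List Int) (number : Int) (out : Int) : Decidable (Spec_binary_compare_count reverse_sorted_list number out) := by unfold Spec_binary_compare_count; infer_instance

-- ===== CLAIM (what is proved, stated in full; the proofs are below) =====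
def Claim_equal_binary_compare_count : Prop := ∀ (reverse_sorted_list : List Int) (number : Int), Dom_binary_compare_count reverse_sorted_list number → Spec_binary_compare_count reverse_sorted_list number (binary_compare_count reverse_sorted_list number)

-- ===== LEMMAS AND PROOFS =====
-- A's loop on bounds (a, b) equals B's recursion on the segment xs[a:b] with offset a.
lemma bccLoopA_eq_go (xs : List Int) (n : Int) :
    ∀ (k : Nat) (a b : Int), 0 ≤ a → a ≤ b → b ≤ (xs.length : Int) → (b - a).toNat ≤ k →
      bccLoopA xs n a b = bccGo n ((xs.drop a.toNat).take (b - a).toNat) a := by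
  intro k
  induction k with
  | zero =>
    intro a b ha hab hb hk
    rw [bccLoopA, bccGo]
    have hba : ¬ a < b := by omega
    have hT : (b - a).toNat = 0 := by omega
    simp [hba, hT]
  | succ k ih =>
    intro a b ha hab hb hk
    rw [bccLoopA, bccGo]
    by_cases hlt : a < b
    · have hmid := PySem.Int.floordiv_eq_ediv_of_pos (a := a + b) (b := 2) (by omega : (0:Int) < 2)
      have hlen : ((xs.drop a.toNat).take (b - a).toNat).length = (b - a).toNat := by
        simp [List.length_take, List.length_drop]; omega
      have hne : ((xs.drop a.toNat).take (b - a).toNat).isEmpty = false := by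
        simp [← List.length_eq_zero_iff, hlen]; omega
      have hmT : (b - a).toNat / 2 < (b - a).toNat := by omega
      have hmid2 : PySem.Int.floordiv (a + b) 2 = a + (((b - a).toNat / 2 : Nat) : Int) := by
        rw [hmid]; omega
      have hprobe : PySem.List.pyGetD xs (PySem.Int.floordiv (a + b) 2) 0
          = PySem.List.pyGetD ((xs.drop a.toNat).take (b - a).toNat)
              ((((xs.drop a.toNat).take (b - a).toNat).length / 2 : Nat) : Int) 0 := by
        rw [hmid2, hlen]
        have h1 : a + (((b - a).toNat / 2 : Nat) : Int) = ((a.toNat + (b - a).toNat / 2 : Nat) : Int) := by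
          omega
        rw [h1, PySem.List.pyGetD_natCast, PySem.List.pyGetD_natCast]
        simp [List.getD, List.getElem?_drop, hmT]
      simp only [hne, Bool.false_eq_true, if_false, dif_pos hlt, hprobe]
      split
      · -- take branch: xs[mid] ≥ n
        have hdrop : PySem.List.slice ((xs.drop a.toNat).take (b - a).toNat)
            (some ((((((xs.drop a.toNat).take (b - a).toNat).length / 2 : Nat)) : Int) + 1)) none
            = (xs.drop (PySem.Int.floordiv (a + b) 2 + 1).toNat).take (b - (PySem.Int.floordiv (a + b) 2 + 1)).toNat := by
          rw [hlen]
          have hc : (((b - a).toNat / 2 : Nat) : Int) + 1 = (((b - a).toNat / 2 + 1 : Nat) : Int) := by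
            push_cast; ring
          rw [hc, PySem.List.slice_from_natCast, List.drop_take, List.drop_drop]
          have e1 : (PySem.Int.floordiv (a + b) 2 + 1).toNat = a.toNat + ((b - a).toNat / 2 + 1) := by
            rw [hmid2]; omega
          have e2 : (b - (PySem.Int.floordiv (a + b) 2 + 1)).toNat = (b - a).toNat - ((b - a).toNat / 2 + 1) := by
            rw [hmid2]; omega
          rw [e1, e2]
        rw [hdrop]
        have hbase : a + ((((xs.drop a.toNat).take (b - a).toNat).length / 2 : Nat) : Int) + 1
            = PySem.Int.floordiv (a + b) 2 + 1 := by
          rw [hlen, hmid2]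
        rw [hbase]
        exact ih (PySem.Int.floordiv (a + b) 2 + 1) b (by rw [hmid2]; omega) (by rw [hmid2]; omega) hb
          (by rw [hmid2] at *; omega)
      · -- drop branch: xs[mid] < n
        have htake : PySem.List.slice ((xs.drop a.toNat).take (b - a).toNat)
            none (some ((((xs.drop a.toNat).take (b - a).toNat).length / 2 : Nat) : Int))
            = (xs.drop a.toNat).take (PySem.Int.floordiv (a + b) 2 - a).toNat := by
          rw [hlen, PySem.List.slice_to_natCast, List.take_take]
          have e1 : min ((b - a).toNat / 2) (b - a).toNat = (PySem.Int.floordiv (a + b) 2 - a).toNat := by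
            rw [hmid2]; omega
          rw [e1]
        rw [htake]
        exact ih a (PySem.Int.floordiv (a + b) 2) ha (by rw [hmid2]; omega)
          (by rw [hmid2]; omega) (by rw [hmid2] at *; omega)
    · have hba : a ≥ b := by omega
      have hT : (b - a).toNat = 0 := by omega
      simp [hlt, hT]

-- ===== VERDICT (by name: the statement is the Claim_ definition above) =====
theorem binary_compare_count_spec : Claim_equal_binary_compare_count := by
  intro xs n _
  unfold Spec_binary_compare_count binary_compare_count binary_compare_count_alt
  have h := bccLoopA_eq_go xs n (xs.length : Int).toNat 0 (xs.length : Int)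
    le_rfl (by positivity) le_rfl (by omega)
  simpa using h
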